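-- pv_equiv track=rewrite | github.com/JadielTeofilo/General-Algorithms | src/interviewbit/arrays/balance_array.py | get_even_prefix
-- ===== SOURCE A (Python) =====
-- from typing import List
--
-- def get_even_prefix(numbers: List[int]) -> List[int]:
-- 	even_prefix_sum: List[int] = [0] * len(numbers)
-- 	for index, number in enumerate(numbers):
-- 		if index != 0:
-- 			even_prefix_sum[index] = even_prefix_sum[index - 1]
-- 		if (index + 1) % 2 == 0:
-- 			even_prefix_sum[index] += number
-- 	return even_prefix_sum
-- ===== SOURCE B (Python) =====
-- from typing import List
--
-- def get_even_prefix(numbers: List[int]) -> List[int]: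
--     # Pairwise traversal: consume two elements per step, no parity test anywhere.
--     # Only the second element of each pair contributes; each step emits two outputs.
--     out: List[int] = []
--     total = 0
--     it = iter(numbers)
--     for _a in it:
--         b = next(it, None)
--         if b is None:          # trailing unpaired element (odd length)
--             out.append(total)
--         else:
--             out.append(total)
--             total += b
--             out.append(total)
--     return out
-- ===== Notes on version B (the rewrite author's own statement) =====
-- stated objective: faster
-- what changed: A indexes into a preallocated result array and tests the 1-based parity of every position; B traverses the list two elements at a time with an iterator, never tests parity and never indexes, adding only the second element of each pair and emitting two running-sum entries per step (constant-factor win: half the loop iterations, no per-element parity test or array indexing).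
import Mathlib
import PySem

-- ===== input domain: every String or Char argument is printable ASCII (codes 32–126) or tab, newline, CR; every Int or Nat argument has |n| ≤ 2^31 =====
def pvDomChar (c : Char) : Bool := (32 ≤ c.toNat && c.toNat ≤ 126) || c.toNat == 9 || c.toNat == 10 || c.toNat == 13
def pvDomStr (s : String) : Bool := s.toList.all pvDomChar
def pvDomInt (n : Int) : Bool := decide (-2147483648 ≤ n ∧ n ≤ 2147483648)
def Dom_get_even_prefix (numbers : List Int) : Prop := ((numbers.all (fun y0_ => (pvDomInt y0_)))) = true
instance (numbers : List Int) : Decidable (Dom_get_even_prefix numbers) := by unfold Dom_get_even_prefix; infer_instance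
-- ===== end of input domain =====

-- B replaces A's parity-tested pass over a preallocated array with a pairwise
-- traversal: two elements consumed per step, two running-sum outputs emitted,
-- no parity test and no indexing.

-- ===== PORT A =====
-- Literal port of A: a zero-filled array of the input's length, then one pass over
-- enumerate(numbers) that copies the previous slot and adds the element at even
-- 1-based positions.  Indices from enumerate are ≥ 0, so .toNat is exact here.
def get_even_prefix (numbers : List Int) : List Int :=
  (PySem.List.enumerate numbers).foldl
    (fun acc p =>
      let acc := if p.1 ≠ 0 then acc.set p.1.toNat (acc.getD (p.1.toNat - 1) 0) else acc
      if (p.1 + 1) % 2 == 0 then acc.set p.1.toNat (acc.getD p.1.toNat 0 + p.2) else acc)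
    (List.replicate numbers.length 0)

-- ===== PORT B =====
-- Source B's iterator loop consumes up to two elements per iteration; that loop is
-- exactly this two-at-a-time structural recursion (b is None ↔ the one-element case).
def pvPairs (total : Int) : List Int → List Int
  | [] => []
  | [_a] => [total]
  | _a :: b :: rest => total :: (total + b) :: pvPairs (total + b) rest

def get_even_prefix_alt (numbers : List Int) : List Int := pvPairs 0 numbers

-- ===== PRECONDITION & SPEC =====
def Spec_get_even_prefix (numbers : List Int) (out : List Int) : Prop := out = get_even_prefix_alt numbers
instance (numbers : List Int) (out : List Int) : Decidable (Spec_get_even_prefix numbers out) := by unfold Spec_get_even_prefix; infer_instance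

-- ===== CLAIM (what is proved, stated in full; the proofs are below) =====
def Claim_equal_get_even_prefix : Prop := ∀ (numbers : List Int), Dom_get_even_prefix numbers → Spec_get_even_prefix numbers (get_even_prefix numbers)

-- ===== LEMMAS AND PROOFS =====

-- Canonical form both ports are reduced to: prefix values of the even-position sum.
def pvSim (prev : Int) (k : Int) : List Int → List Int
  | [] => []
  | x :: xs =>
      let v := if (k + 1) % 2 == 0 then prev + x else prev
      v :: pvSim v (k + 1) xs

theorem pvPairs_eq_sim : ∀ (xs : List Int) (total k : Int), k % 2 = 0 →
    pvPairs total xs = pvSim total k xs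
  | [], _, _, _ => rfl
  | [x], total, k, hk => by
      have h1 : ((k + 1) % 2 == 0) = false := by simp; omega
      simp [pvPairs, pvSim, h1]
  | a :: b :: rest, total, k, hk => by
      have h1 : ((k + 1) % 2 == 0) = false := by simp; omega
      have h2 : ((k + 1 + 1) % 2 == 0) = true := by simp; omega
      simp only [pvPairs, pvSim, h1, h2, if_false, if_true, Bool.false_eq_true,
        List.cons.injEq, true_and]
      rw [pvPairs_eq_sim rest (total + b) (k + 2) (by omega)]; ring_nf

theorem pv_set_append (done l : List Int) (y v : Int) :
    (done ++ y :: l).set done.length v = done ++ v :: l := by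
  induction done with
  | nil => simp
  | cons d ds ih => simp [ih]

theorem pv_getD_append_last (done l : List Int) (d : Int) (ds : List Int)
    (h : done = d :: ds) (prev : Int) (hl : done.getLast? = some prev) :
    (done ++ l).getD (done.length - 1) 0 = prev := by
  subst h
  induction ds generalizing d with
  | nil => simp_all
  | cons e es ih =>
      simp only [List.getLast?_cons_cons] at hl
      simpa [List.length_cons] using ih e hl

theorem pv_foldA (rest : List Int) : ∀ (done : List Int) (prev : Int),
    (done = [] → prev = 0) → (done ≠ [] → done.getLast? = some prev) →
    (PySem.List.enumerate rest (done.length : Int)).foldl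
      (fun acc p =>
        let acc := if p.1 ≠ 0 then acc.set p.1.toNat (acc.getD (p.1.toNat - 1) 0) else acc
        if (p.1 + 1) % 2 == 0 then acc.set p.1.toNat (acc.getD p.1.toNat 0 + p.2) else acc)
      (done ++ List.replicate rest.length 0)
    = done ++ pvSim prev (done.length : Int) rest := by
  induction rest with
  | nil => intro done prev _ _; simp [PySem.List.enumerate_nil, pvSim]
  | cons x xs ih =>
      intro done prev h0 hl
      simp only [PySem.List.enumerate_cons, List.foldl_cons, List.length_cons,
        List.replicate_succ, pvSim]
      have htn : ((done.length : Int)).toNat = done.length := Int.toNat_natCast _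
      have hstep1 :
          (if (done.length : Int) ≠ 0 then
            (done ++ 0 :: List.replicate xs.length 0).set ((done.length : Int)).toNat
              ((done ++ 0 :: List.replicate xs.length 0).getD (((done.length : Int)).toNat - 1) 0)
          else (done ++ 0 :: List.replicate xs.length 0))
          = done ++ prev :: List.replicate xs.length 0 := by
        cases hd : done with
        | nil =>
            have := h0 hd
            subst hd this
            simp
        | cons d ds =>
            subst hd
            have hne : (((d :: ds).length : Int)) ≠ 0 := by
              simp only [List.length_cons, Nat.cast_add, Nat.cast_one]
              omega
            rw [if_pos hne, htn,
              pv_getD_append_last (d :: ds) (0 :: List.replicate xs.length 0) d ds rfl prev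
                (hl (by simp)),
              pv_set_append]
      rw [hstep1]
      set v : Int := if ((done.length : Int) + 1) % 2 == 0 then prev + x else prev with hv
      have hstep2 :
          (if ((done.length : Int) + 1) % 2 == 0 then
            (done ++ prev :: List.replicate xs.length 0).set ((done.length : Int)).toNat
              ((done ++ prev :: List.replicate xs.length 0).getD ((done.length : Int)).toNat 0 + x)
          else (done ++ prev :: List.replicate xs.length 0))
          = (done ++ [v]) ++ List.replicate xs.length 0 := by
        by_cases hp : ((done.length : Int) + 1) % 2 == 0 <;>
          simp [hp, htn, hv]
      rw [hstep2]
      have hlen : ((done ++ [v]).length : Int) = (done.length : Int) + 1 := by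
        simp
      have := ih (done ++ [v]) v (by simp) (by simp)
      rw [hlen] at this
      rw [this]
      simp

-- ===== VERDICT (by name: the statement is the Claim_ definition above) =====
theorem get_even_prefix_spec : Claim_equal_get_even_prefix := by
  intro numbers _
  show get_even_prefix numbers = get_even_prefix_alt numbers
  unfold get_even_prefix get_even_prefix_alt
  have hA := pv_foldA numbers [] 0 (fun _ => rfl) (fun h => absurd rfl h)
  simp only [List.nil_append, List.length_nil, Nat.cast_zero] at hA
  rw [show PySem.List.enumerate numbers = PySem.List.enumerate numbers 0 from rfl, hA,
    pvPairs_eq_sim numbers 0 0 (by omega)]
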